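-- pv_equiv track=rewrite | github.com/dn6049949/library | math/BostanMori.py | bostan_mori
-- ===== SOURCE A (Python) =====
-- def mul_even(p, q):
--     res = [0]*((len(p)+len(q))>>1)
--     for i, pi in enumerate(p):
--         for j, qj in enumerate(q):
--             k = i+j
--             if not k&1:
--                 res[k>>1] += pi*qj
--     return res
--
-- def mul_odd(p, q):
--     res = [0]*((len(p)+len(q))>>1)
--     for i, pi in enumerate(p):
--         for j, qj in enumerate(q):
--             k = i+j
--             if k&1:
--                 res[k>>1] += pi*qj
--     return res
--
-- def bostan_mori(p, q, n):
--     while n: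
--         q_ = [qi if not i&1 else -qi for i, qi in enumerate(q)]
--         q = mul_even(q, q_)
--         if not n&1:
--             p = mul_even(p, q_)
--         else:
--             p = mul_odd(p, q_)
--         n >>= 1
--     return p[0]
-- ===== SOURCE B (Python) =====
-- def _coeffs(a, b, start):
--     # coefficients start, start+2, start+4, ... of the product a*b,
--     # computed output-first (gather), (len(a)+len(b))>>1 of them
--     m = (len(a) + len(b)) >> 1
--     out = []
--     for t in range(m):
--         k = 2 * t + start
--         lo = max(0, k - len(b) + 1)
--         hi = min(k, len(a) - 1)
--         out.append(sum(a[i] * b[k - i] for i in range(lo, hi + 1)))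
--     return out
--
-- def bostan_mori(p, q, n):
--     if n == 0:
--         return p[0]
--     qn = [(-1) ** i * c for i, c in enumerate(q)]
--     return bostan_mori(_coeffs(p, qn, n & 1), _coeffs(q, qn, 0), n >> 1)
-- ===== Notes on version B (the rewrite author's own statement) =====
-- stated objective: alternative
-- what changed: Each Bostan-Mori step computes the needed even/odd coefficients of the polynomial products output-first (one explicitly bounded gather sum per output coefficient) instead of A's input-first scatter (nested enumerate loops writing parity-filtered terms into a preallocated accumulator), and the halving iteration is recursive instead of a while loop.
-- outside the precondition, e.g. on bostan_mori([1, 2], [], 1): A returns 0, B returns 0; on bostan_mori([], [1, 1], 1): A returns 0, B returns 0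
import Mathlib
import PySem

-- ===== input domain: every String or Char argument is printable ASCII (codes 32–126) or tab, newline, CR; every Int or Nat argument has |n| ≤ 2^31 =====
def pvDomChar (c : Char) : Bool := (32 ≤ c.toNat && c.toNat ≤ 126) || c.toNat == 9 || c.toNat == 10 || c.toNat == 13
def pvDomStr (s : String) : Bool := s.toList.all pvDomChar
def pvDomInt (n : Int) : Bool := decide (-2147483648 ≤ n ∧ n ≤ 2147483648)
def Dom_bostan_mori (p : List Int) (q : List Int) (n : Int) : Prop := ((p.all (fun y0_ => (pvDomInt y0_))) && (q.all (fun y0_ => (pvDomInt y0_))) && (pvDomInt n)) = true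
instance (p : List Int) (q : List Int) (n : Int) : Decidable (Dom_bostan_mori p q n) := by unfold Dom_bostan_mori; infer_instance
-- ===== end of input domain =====

-- B computes each Bostan–Mori step's even/odd product coefficients output-first (one bounded
-- gather sum per coefficient) instead of A's scatter into a parity-filtered accumulator, and
-- recurses instead of looping; alternative structure, same asymptotic cost.

-- ===== PORT A =====
def pvMulEven (p q : List Int) : List Int :=
  (PySem.List.enumerate p).foldl (fun res ip =>
    (PySem.List.enumerate q).foldl (fun res jq =>
      let k := ip.1 + jq.1
      if PySem.Int.band k 1 == 0 then
        PySem.List.pySetD res (k >>> (1:Nat)) (PySem.List.pyGetD res (k >>> (1:Nat)) 0 + ip.2 * jq.2)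
      else res) res)
    (List.replicate ((p.length + q.length) >>> 1) (0 : Int))

def pvMulOdd (p q : List Int) : List Int :=
  (PySem.List.enumerate p).foldl (fun res ip =>
    (PySem.List.enumerate q).foldl (fun res jq =>
      let k := ip.1 + jq.1
      if !(PySem.Int.band k 1 == 0) then
        PySem.List.pySetD res (k >>> (1:Nat)) (PySem.List.pyGetD res (k >>> (1:Nat)) 0 + ip.2 * jq.2)
      else res) res)
    (List.replicate ((p.length + q.length) >>> 1) (0 : Int))

def pvLoopA (fuel : Nat) (p q : List Int) (n : Int) : Int :=
  match fuel with
  | 0 => 0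
  | fuel + 1 =>
    if n = 0 then PySem.List.pyGetD p 0 0
    else
      let q' := (PySem.List.enumerate q).map (fun ic => if PySem.Int.band ic.1 1 == 0 then ic.2 else -ic.2)
      let q2 := pvMulEven q q'
      let p2 := if PySem.Int.band n 1 == 0 then pvMulEven p q' else pvMulOdd p q'
      pvLoopA fuel p2 q2 (n >>> (1:Nat))

def bostan_mori (p : List Int) (q : List Int) (n : Int) : Int :=
  pvLoopA (n.toNat + 1) p q n

-- ===== PORT B =====
def pvCoeffsB (a b : List Int) (start : Int) : List Int :=
  let m := (a.length + b.length) >>> 1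
  (PySem.List.pyRange 0 (m : Int) 1).map (fun t =>
    let k := 2 * t + start
    let lo := max 0 (k - (b.length : Int) + 1)
    let hi := min k ((a.length : Int) - 1)
    (PySem.List.pyRange lo (hi + 1) 1).foldl
      (fun s i => s + PySem.List.pyGetD a i 0 * PySem.List.pyGetD b (k - i) 0) 0)

def pvLoopB (fuel : Nat) (p q : List Int) (n : Int) : Int :=
  match fuel with
  | 0 => 0
  | fuel + 1 =>
    if n = 0 then PySem.List.pyGetD p 0 0
    else
      let qn := (PySem.List.enumerate q).map (fun ic => (-1) ^ ic.1.toNat * ic.2)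
      pvLoopB fuel (pvCoeffsB p qn (PySem.Int.band n 1)) (pvCoeffsB q qn 0) (n >>> (1:Nat))

def bostan_mori_alt (p : List Int) (q : List Int) (n : Int) : Int :=
  pvLoopB (n.toNat + 1) p q n

-- ===== PRECONDITION & SPEC =====
-- Pre_ excludes n < 0 (A's while loop never terminates there) and an empty p or q: on those
-- degenerate (empty-polynomial) inputs Python raises IndexError for some shapes (e.g. p = [],
-- n = 0, or p = [1], q = [], n = 1), and the zeros A returns on the remaining shapes are
-- artefacts of padding a degenerate zero denominator/numerator (B returns the same zeros there).
def Pre_bostan_mori (p : List Int) (q : List Int) (n : Int) : Prop :=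
  0 ≤ n ∧ p ≠ [] ∧ q ≠ []
instance (p : List Int) (q : List Int) (n : Int) : Decidable (Pre_bostan_mori p q n) := by
  unfold Pre_bostan_mori; infer_instance

def pvWitness_bostan_mori : List Int × List Int × Int := ([1], [1, -1], 5)

def Spec_bostan_mori (p : List Int) (q : List Int) (n : Int) (out : Int) : Prop := out = bostan_mori_alt p q n
instance (p : List Int) (q : List Int) (n : Int) (out : Int) : Decidable (Spec_bostan_mori p q n out) := by unfold Spec_bostan_mori; infer_instance

-- ===== CLAIM (what is proved, stated in full; the proofs are below) =====
def Claim_equal_bostan_mori : Prop := ∀ (p : List Int) (q : List Int) (n : Int), Dom_bostan_mori p q n → Pre_bostan_mori p q n → Spec_bostan_mori p q n (bostan_mori p q n)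

-- ===== LEMMAS AND PROOFS =====

def pvScatStep (c : Int → Bool) (pi : Int) (i : Int) : List Int → Int × Int → List Int :=
  fun r jq =>
    let k := i + jq.1
    if c k then PySem.List.pySetD r (k >>> (1:Nat)) (PySem.List.pyGetD r (k >>> (1:Nat)) 0 + pi * jq.2) else r

lemma pvShiftR1 (m : Nat) : ((m:Int) >>> (1:Nat)) = ((m/2 : Nat) : Int) := by
  simp [Int.shiftRight_eq_div_pow]

lemma pvInnerLen (c : Int → Bool) (pi : Int) :
    ∀ (b : List Int) (s i : Int) (r : List Int),
    ((PySem.List.enumerate b s).foldl (pvScatStep c pi i) r).length = r.length := by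
  intro b
  induction b with
  | nil => intro s i r; simp [PySem.List.enumerate_nil]
  | cons x bs ih =>
    intro s i r
    rw [PySem.List.enumerate_cons, List.foldl_cons, ih]
    simp only [pvScatStep]
    split
    · exact PySem.List.length_pySetD _ _ _
    · rfl

lemma pvInnerGetD (c : Int → Bool) (pi : Int) (b : List Int) :
    ∀ (i s : Nat) (r : List Int) (t : Nat),
    (∀ j, j < b.length → c ((i+s+j : Nat) : Int) = true → (i+s+j)/2 < r.length) →
    PySem.List.pyGetD ((PySem.List.enumerate b (s : Int)).foldl (pvScatStep c pi (i : Int)) r) (t : Int) 0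
      = PySem.List.pyGetD r (t : Int) 0
        + pi * ∑ j ∈ Finset.range b.length, (if c ((i+s+j : Nat) : Int) ∧ (i+s+j)/2 = t then b.getD j 0 else 0) := by
  induction b with
  | nil => intro i s r t _; simp [PySem.List.enumerate_nil]
  | cons x bs ih =>
    intro i s r t hin
    rw [PySem.List.enumerate_cons, List.foldl_cons]
    have hcast : (i : Int) + (s : Int) = ((i+s : Nat) : Int) := by push_cast; ring
    by_cases hc : c ((i+s : Nat) : Int) = true
    · have hlt : (i+s)/2 < r.length := by
        have := hin 0 (by simp) (by simpa using hc)
        simpa using this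
      have hstep : pvScatStep c pi (i : Int) r ((s : Int), x)
          = PySem.List.pySetD r (((i+s)/2 : Nat) : Int)
              (PySem.List.pyGetD r (((i+s)/2 : Nat) : Int) 0 + pi * x) := by
        simp only [pvScatStep, hcast, pvShiftR1, hc, if_true]
      rw [hstep]
      have hs1 : ((s : Int) + 1) = ((s+1 : Nat) : Int) := by push_cast; ring
      rw [hs1, ih i (s+1) _ t]
      · rw [PySem.List.pyGetD_pySetD_natCast r ((i+s)/2) t _ 0 hlt]
        simp only [List.length_cons]
        rw [Finset.sum_range_succ']
        simp only [List.getD_cons_succ, List.getD_cons_zero]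
        have hsh : ∀ j : Nat, i + (s+1) + j = i + s + (j+1) := by omega
        simp only [hsh]
        simp only [hc, true_and, Nat.add_zero]
        by_cases ht : t = (i+s)/2
        · rw [if_pos ht, if_pos (by omega : (i+s)/2 = t), ht]
          ring
        · rw [if_neg ht, if_neg (by omega : ¬ (i+s)/2 = t)]
          ring
      · intro j hj hcj
        rw [PySem.List.length_pySetD]
        have : i + (s+1) + j = i + s + (j+1) := by omega
        rw [this] at hcj ⊢
        exact hin (j+1) (by simpa using hj) hcj
    · have hstep : pvScatStep c pi (i : Int) r ((s : Int), x) = r := by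
        simp only [pvScatStep]
        rw [hcast, if_neg hc]
      rw [hstep]
      have hs1 : ((s : Int) + 1) = ((s+1 : Nat) : Int) := by push_cast; ring
      rw [hs1, ih i (s+1) _ t]
      · simp only [List.length_cons]
        rw [Finset.sum_range_succ']
        simp only [List.getD_cons_succ, List.getD_cons_zero]
        have hsh : ∀ j : Nat, i + (s+1) + j = i + s + (j+1) := by omega
        simp only [hsh]
        simp only [hc, Bool.false_eq_true, false_and, if_false, add_zero]
      · intro j hj hcj
        have : i + (s+1) + j = i + s + (j+1) := by omega
        rw [this] at hcj ⊢
        exact hin (j+1) (by simpa using hj) hcj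

lemma pvOuterLen (c : Int → Bool) (a b : List Int) :
    ∀ (s : Int) (r : List Int),
    ((PySem.List.enumerate a s).foldl
        (fun r ip => (PySem.List.enumerate b 0).foldl (pvScatStep c ip.2 ip.1) r) r).length
      = r.length := by
  induction a with
  | nil => intro s r; simp [PySem.List.enumerate_nil]
  | cons y as ih =>
    intro s r
    rw [PySem.List.enumerate_cons, List.foldl_cons, ih, pvInnerLen]

lemma pvOuterGetD (c : Int → Bool) (a b : List Int) :
    ∀ (s : Nat) (r : List Int) (t : Nat),
    (∀ i j, i < a.length → j < b.length → c ((s+i+j : Nat) : Int) = true → (s+i+j)/2 < r.length) →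
    PySem.List.pyGetD ((PySem.List.enumerate a (s : Int)).foldl
        (fun r ip => (PySem.List.enumerate b 0).foldl (pvScatStep c ip.2 ip.1) r) r) (t : Int) 0
      = PySem.List.pyGetD r (t : Int) 0
        + ∑ i ∈ Finset.range a.length, a.getD i 0 *
            ∑ j ∈ Finset.range b.length, (if c ((s+i+j : Nat) : Int) ∧ (s+i+j)/2 = t then b.getD j 0 else 0) := by
  induction a with
  | nil => intro s r t _; simp [PySem.List.enumerate_nil]
  | cons y as ih =>
    intro s r t hin
    rw [PySem.List.enumerate_cons, List.foldl_cons]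
    have hs1 : ((s : Int) + 1) = ((s+1 : Nat) : Int) := by push_cast; ring
    rw [hs1, ih (s+1) _ t]
    · have hinner := pvInnerGetD c y b s 0 r t (by
        intro j hj hcj
        have h0 : s + 0 + j = s + 0 + j := rfl
        exact hin 0 j (by simp) hj hcj)
      have h00 : ((0:Nat) : Int) = (0 : Int) := by norm_cast
      rw [h00] at hinner
      rw [hinner]
      simp only [List.length_cons]
      rw [Finset.sum_range_succ']
      simp only [List.getD_cons_succ, List.getD_cons_zero]
      have hsh : ∀ i j : Nat, s + 1 + i + j = s + (i+1) + j := by omega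
      simp only [hsh]
      have hs0 : ∀ j : Nat, s + 0 + j = s + j := by omega
      have hs0' : ∀ j : Nat, s + j = s + 0 + j := by omega
      ring
    · intro i j hi hj hcj
      rw [pvInnerLen]
      have : s + 1 + i + j = s + (i+1) + j := by omega
      rw [this] at hcj ⊢
      exact hin (i+1) j (by simpa using hi) hj hcj

lemma pvSumRange (n : Nat) (f : Nat → Int) :
    ((List.range n).map f).sum = ∑ i ∈ Finset.range n, f i := by
  induction n with
  | zero => simp
  | succ n ih => rw [List.range_succ, Finset.sum_range_succ]; simp [ih]

lemma pvBandOne (m : Nat) : PySem.Int.band (m : Int) 1 = ((m % 2 : Nat) : Int) := by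
  rw [PySem.Int.band_one]; exact_mod_cast PySem.Int.mod_natCast m 2

lemma pvEvenCond (m t : Nat) :
    ((PySem.Int.band (m : Int) 1 == 0) = true ∧ m/2 = t) ↔ m = 2*t := by
  simp only [pvBandOne, beq_iff_eq, Nat.cast_eq_zero]
  omega

lemma pvOddCond (m t : Nat) :
    (((!(PySem.Int.band (m : Int) 1 == 0)) = true) ∧ m/2 = t) ↔ m = 2*t+1 := by
  simp only [pvBandOne, Bool.not_eq_true', beq_eq_false_iff_ne, ne_eq, Nat.cast_eq_zero]
  omega

lemma pvMulEven_len (a b : List Int) :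
    (pvMulEven a b).length = (a.length + b.length) >>> 1 := by
  have e : pvMulEven a b
      = (PySem.List.enumerate a 0).foldl
          (fun r ip => (PySem.List.enumerate b 0).foldl
            (pvScatStep (fun k => PySem.Int.band k 1 == 0) ip.2 ip.1) r)
          (List.replicate ((a.length + b.length) >>> 1) (0:Int)) := rfl
  rw [e, pvOuterLen, List.length_replicate]

lemma pvMulOdd_len (a b : List Int) :
    (pvMulOdd a b).length = (a.length + b.length) >>> 1 := by
  have e : pvMulOdd a b
      = (PySem.List.enumerate a 0).foldl
          (fun r ip => (PySem.List.enumerate b 0).foldl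
            (pvScatStep (fun k => !(PySem.Int.band k 1 == 0)) ip.2 ip.1) r)
          (List.replicate ((a.length + b.length) >>> 1) (0:Int)) := rfl
  rw [e, pvOuterLen, List.length_replicate]

lemma pvReplicateGetD (m t : Nat) : PySem.List.pyGetD (List.replicate m (0:Int)) (t : Int) 0 = 0 := by
  rw [PySem.List.pyGetD_natCast]
  simp [List.getD, List.getElem?_replicate]
  split <;> rfl

lemma pvMulEven_getD (a b : List Int) (t : Nat) :
    PySem.List.pyGetD (pvMulEven a b) (t : Int) 0
      = ∑ i ∈ Finset.range a.length, a.getD i 0 *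
          ∑ j ∈ Finset.range b.length, (if i + j = 2*t then b.getD j 0 else 0) := by
  have e : pvMulEven a b
      = (PySem.List.enumerate a ((0:Nat) : Int)).foldl
          (fun r ip => (PySem.List.enumerate b 0).foldl
            (pvScatStep (fun k => PySem.Int.band k 1 == 0) ip.2 ip.1) r)
          (List.replicate ((a.length + b.length) >>> 1) (0:Int)) := rfl
  rw [e, pvOuterGetD, pvReplicateGetD]
  · rw [zero_add]
    apply Finset.sum_congr rfl
    intro i _
    congr 1
    apply Finset.sum_congr rfl
    intro j _
    have hcond2 : ((PySem.Int.band ((0+i+j : Nat) : Int) 1 == 0) = true ∧ (0+i+j)/2 = t) ↔ (i + j = 2*t) :=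
      (pvEvenCond (0+i+j) t).trans (by omega)
    simp only [hcond2]
  · intro i j hi hj hc
    rw [List.length_replicate]
    have : (0+i+j) % 2 = 0 := by
      have := (pvEvenCond (0+i+j) ((0+i+j)/2)).1 ⟨hc, rfl⟩
      omega
    have h1 : (a.length + b.length) >>> 1 = (a.length + b.length) / 2 := Nat.shiftRight_one _
    omega

lemma pvMulOdd_getD (a b : List Int) (t : Nat) :
    PySem.List.pyGetD (pvMulOdd a b) (t : Int) 0
      = ∑ i ∈ Finset.range a.length, a.getD i 0 *
          ∑ j ∈ Finset.range b.length, (if i + j = 2*t+1 then b.getD j 0 else 0) := by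
  have e : pvMulOdd a b
      = (PySem.List.enumerate a ((0:Nat) : Int)).foldl
          (fun r ip => (PySem.List.enumerate b 0).foldl
            (pvScatStep (fun k => !(PySem.Int.band k 1 == 0)) ip.2 ip.1) r)
          (List.replicate ((a.length + b.length) >>> 1) (0:Int)) := rfl
  rw [e, pvOuterGetD, pvReplicateGetD]
  · rw [zero_add]
    apply Finset.sum_congr rfl
    intro i _
    congr 1
    apply Finset.sum_congr rfl
    intro j _
    have hcond2 : ((!(PySem.Int.band ((0+i+j : Nat) : Int) 1 == 0)) = true ∧ (0+i+j)/2 = t) ↔ (i + j = 2*t+1) :=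
      (pvOddCond (0+i+j) t).trans (by omega)
    simp only [hcond2]
  · intro i j hi hj hc
    rw [List.length_replicate]
    have : (0+i+j) % 2 = 1 := by
      have := (pvOddCond (0+i+j) ((0+i+j)/2)).1 ⟨hc, rfl⟩
      omega
    have h1 : (a.length + b.length) >>> 1 = (a.length + b.length) / 2 := Nat.shiftRight_one _
    omega

lemma pvInnerCollapse (b : List Int) (K i : Nat) :
    (∑ j ∈ Finset.range b.length, if i + j = K then b.getD j 0 else 0)
      = if i ≤ K ∧ K - i < b.length then b.getD (K-i) 0 else 0 := by
  by_cases h : i ≤ K ∧ K - i < b.length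
  · rw [if_pos h]
    rw [Finset.sum_eq_single_of_mem (K-i) (Finset.mem_range.mpr h.2)]
    · rw [if_pos (by omega)]
    · intro j hj hne
      rw [if_neg (by simp at hj; omega)]
  · rw [if_neg h]
    apply Finset.sum_eq_zero
    intro j hj
    rw [if_neg (by simp at hj; omega)]

lemma pvCoeffsB_len (a b : List Int) (st : Int) :
    (pvCoeffsB a b st).length = (a.length + b.length) >>> 1 := by
  simp [pvCoeffsB, PySem.List.length_pyRange_one]
  rw [Int.shiftRight_eq_div_pow, Nat.shiftRight_one]
  omega

lemma pvCoeffsB_getD (a b : List Int) (par t : Nat) (ht : t < (a.length + b.length) >>> 1) :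
    PySem.List.pyGetD (pvCoeffsB a b ((par : Nat) : Int)) (t : Int) 0
      = ∑ i ∈ Finset.range a.length, a.getD i 0 *
          ∑ j ∈ Finset.range b.length, (if i + j = 2*t+par then b.getD j 0 else 0) := by
  set m : Nat := (a.length + b.length) >>> 1 with hm
  set K : Nat := 2*t+par with hK
  have hunf : pvCoeffsB a b ((par : Nat) : Int)
      = (PySem.List.pyRange 0 (m : Int) 1).map (fun ti =>
          (PySem.List.pyRange (max 0 (2*ti + (par:Int) - (b.length : Int) + 1))
              (min (2*ti + (par:Int)) ((a.length : Int) - 1) + 1) 1).foldl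
            (fun s i => s + PySem.List.pyGetD a i 0 * PySem.List.pyGetD b ((2*ti + (par:Int)) - i) 0) 0) := rfl
  rw [hunf, PySem.List.pyGetD_map_pyRange_of_nonneg _ _ _ _ (by positivity) (by exact_mod_cast ht)]
  set lo : Nat := K + 1 - b.length with hlo
  set hi : Nat := min (K+1) a.length with hhi
  have hlo' : max 0 (2*(t:Int) + (par:Int) - (b.length : Int) + 1) = (lo : Nat) := by
    omega
  have hhi' : min (2*(t:Int) + (par:Int)) ((a.length : Int) - 1) + 1 = (hi : Nat) := by
    omega
  rw [hlo', hhi', PySem.List.foldl_add, zero_add, PySem.List.pyRange_one]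
  have hcnt : (((hi:Nat) : Int) - ((lo:Nat) : Int)).toNat = hi - lo := by omega
  rw [hcnt, List.map_map, pvSumRange]
  -- rewrite each gather term into getD form
  have hterm : ∀ u ∈ Finset.range (hi - lo),
      ((fun i => PySem.List.pyGetD a i 0 * PySem.List.pyGetD b (2*(t:Int) + (par:Int) - i) 0) ∘ fun (k:Nat) => ((lo:Nat):Int) + (k:Int)) u
        = a.getD (lo+u) 0 * b.getD (K - (lo+u)) 0 := by
    intro u hu
    simp only [Function.comp_apply]
    have h1 : ((lo:Nat):Int) + (u:Int) = ((lo+u : Nat) : Int) := by push_cast; ring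
    have h2 : 2*(t:Int) + (par:Int) - ((lo+u : Nat) : Int) = ((K - (lo+u) : Nat) : Int) := by
      simp at hu
      push_cast
      omega
    rw [h1, h2, PySem.List.pyGetD_natCast, PySem.List.pyGetD_natCast]
  rw [Finset.sum_congr rfl hterm]
  -- rewrite the scatter-style RHS into a windowed sum
  have hrhs : ∀ i ∈ Finset.range a.length,
      a.getD i 0 * ∑ j ∈ Finset.range b.length, (if i + j = K then b.getD j 0 else 0)
        = (if i ≤ K ∧ K - i < b.length then a.getD i 0 * b.getD (K-i) 0 else 0) := by
    intro i _
    rw [pvInnerCollapse b K i, mul_ite, mul_zero]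
  rw [Finset.sum_congr rfl hrhs, ← Finset.sum_filter]
  have hfilt : (Finset.range a.length).filter (fun i => i ≤ K ∧ K - i < b.length)
      = Finset.Ico lo hi := by
    apply Finset.ext
    intro i
    simp only [Finset.mem_filter, Finset.mem_range, Finset.mem_Ico]
    omega
  rw [hfilt, Finset.sum_Ico_eq_sum_range]

lemma pvMulEven_eq (a b : List Int) : pvMulEven a b = pvCoeffsB a b 0 := by
  apply List.ext_getElem
  · rw [pvMulEven_len, pvCoeffsB_len]
  · intro t h1 h2
    rw [pvMulEven_len] at h1
    have e1 : (pvMulEven a b)[t] = PySem.List.pyGetD (pvMulEven a b) (t : Int) 0 := by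
      rw [PySem.List.pyGetD_natCast, List.getD_eq_getElem]
    have e2 : (pvCoeffsB a b 0)[t] = PySem.List.pyGetD (pvCoeffsB a b 0) (t : Int) 0 := by
      rw [PySem.List.pyGetD_natCast, List.getD_eq_getElem]
    rw [e1, e2, pvMulEven_getD]
    have h := pvCoeffsB_getD a b 0 t h1
    simp only [Nat.cast_zero, add_zero] at h
    rw [h]

lemma pvMulOdd_eq (a b : List Int) : pvMulOdd a b = pvCoeffsB a b 1 := by
  apply List.ext_getElem
  · rw [pvMulOdd_len, pvCoeffsB_len]
  · intro t h1 h2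
    rw [pvMulOdd_len] at h1
    have e1 : (pvMulOdd a b)[t] = PySem.List.pyGetD (pvMulOdd a b) (t : Int) 0 := by
      rw [PySem.List.pyGetD_natCast, List.getD_eq_getElem]
    have e2 : (pvCoeffsB a b 1)[t] = PySem.List.pyGetD (pvCoeffsB a b 1) (t : Int) 0 := by
      rw [PySem.List.pyGetD_natCast, List.getD_eq_getElem]
    rw [e1, e2, pvMulOdd_getD]
    have h := pvCoeffsB_getD a b 1 t h1
    simp only [Nat.cast_one] at h
    rw [h]

lemma pvQneg_eq (q : List Int) :
    (PySem.List.enumerate q).map (fun ic => if PySem.Int.band ic.1 1 == 0 then ic.2 else -ic.2)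
      = (PySem.List.enumerate q).map (fun ic => (-1) ^ ic.1.toNat * ic.2) := by
  apply List.map_congr_left
  intro ic hic
  rcases (PySem.List.mem_enumerate_iff q 0 ic).1 hic with ⟨k, hk, rfl⟩
  simp only [zero_add]
  have hfst : ((k : Int)).toNat = k := rfl
  rw [hfst, pvBandOne]
  rcases Nat.even_or_odd k with he | ho
  · have h2 : k % 2 = 0 := Nat.even_iff.mp he
    simp [h2, he.neg_one_pow]
  · have h2 : k % 2 = 1 := Nat.odd_iff.mp ho
    simp [h2, ho.neg_one_pow]

lemma pvBandN (n : Int) : PySem.Int.band n 1 = 0 ∨ PySem.Int.band n 1 = 1 := by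
  rw [PySem.Int.band_one, PySem.Int.mod_eq_emod_of_pos (by norm_num)]
  omega

lemma pvLoop_eq : ∀ (fuel : Nat) (p q : List Int) (n : Int),
    pvLoopA fuel p q n = pvLoopB fuel p q n := by
  intro fuel
  induction fuel with
  | zero => intro p q n; rfl
  | succ fuel ih =>
    intro p q n
    simp only [pvLoopA, pvLoopB]
    by_cases hn : n = 0
    · simp [hn]
    · simp only [hn, if_false]
      rw [pvQneg_eq]
      simp only [pvMulEven_eq, pvMulOdd_eq]
      rcases pvBandN n with hb | hb
      · rw [hb, if_pos (by norm_num)]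
        exact ih _ _ _
      · rw [hb, if_neg (by simp)]
        exact ih _ _ _

theorem pvMain (p q : List Int) (n : Int) : bostan_mori p q n = bostan_mori_alt p q n := by
  unfold bostan_mori bostan_mori_alt
  exact pvLoop_eq _ _ _ _

-- ===== VERDICT (by name: the statement is the Claim_ definition above) =====
theorem bostan_mori_spec : Claim_equal_bostan_mori := by
  intro p q n _ _
  exact pvMain p q n
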